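-- pv_equiv track=rewrite | github.com/KurtWeston/readme-toc | src/readme_toc/updater.py | find_toc_markers
-- ===== SOURCE A (Python) =====
-- from typing import Optional, Tuple
--
-- def find_toc_markers(content: str, start_marker: str, end_marker: str) -> Optional[Tuple[int, int]]:
--     """Find TOC marker positions in content."""
--     lines = content.split('\n')
--     start_idx = None
--     end_idx = None
--
--     for i, line in enumerate(lines):
--         if start_marker in line and start_idx is None:
--             start_idx = i
--         elif end_marker in line and start_idx is not None:
--             end_idx = i
--             break
--
--     if start_idx is not None and end_idx is not None:
--         return (start_idx, end_idx)
--     return None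
-- ===== SOURCE B (Python) =====
-- from typing import Optional, Tuple
--
--
-- def _first_index(lines, marker, start):
--     """Index of the first line at position >= start containing marker, else None."""
--     for k, line in enumerate(lines[start:]):
--         if marker in line:
--             return start + k
--     return None
--
--
-- def find_toc_markers(content: str, start_marker: str, end_marker: str) -> Optional[Tuple[int, int]]:
--     """Find TOC marker positions in content."""
--     lines = content.split('\n')
--     s = _first_index(lines, start_marker, 0)
--     if s is None:
--         return None
--     e = _first_index(lines, end_marker, s + 1)
--     if e is None:
--         return None
--     return (s, e)
-- ===== Notes on version B (the rewrite author's own statement) =====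
-- stated objective: simpler
-- what changed: Replaces the single interleaved stateful loop (two Optional accumulators, an elif coupling them, break) with one reusable helper that finds the first matching line from a given position, called twice sequentially: once for the start marker from 0, once for the end marker from start+1.
import Mathlib
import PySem

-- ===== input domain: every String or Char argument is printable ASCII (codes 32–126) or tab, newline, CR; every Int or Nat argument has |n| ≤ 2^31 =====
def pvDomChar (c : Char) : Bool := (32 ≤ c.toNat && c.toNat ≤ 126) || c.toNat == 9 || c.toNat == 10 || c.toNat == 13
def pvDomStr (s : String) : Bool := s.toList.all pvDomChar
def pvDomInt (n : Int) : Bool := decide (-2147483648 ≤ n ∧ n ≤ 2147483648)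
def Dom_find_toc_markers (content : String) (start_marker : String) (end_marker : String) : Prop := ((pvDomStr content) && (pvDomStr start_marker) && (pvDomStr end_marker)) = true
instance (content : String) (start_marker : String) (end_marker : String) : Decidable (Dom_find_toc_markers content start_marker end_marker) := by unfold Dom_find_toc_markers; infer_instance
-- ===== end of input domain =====

-- B replaces A's single interleaved stateful loop (two Optional accumulators coupled by an elif,
-- plus a break) with one reusable first-match-from-position helper called twice sequentially.


-- ===== PORT A =====
-- A's for-loop over enumerate(lines) with the two accumulators start_idx/end_idx; the break
-- returns (start_idx, end_idx) directly, falling off the loop with end_idx still None gives None.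
def pvLoopA (start_marker end_marker : String) : List String → Int → Option Int → Option (Int × Int)
  | [], _, _ => none
  | line :: rest, i, startIdx =>
    if PySem.Str.isIn start_marker line && startIdx.isNone then
      pvLoopA start_marker end_marker rest (i + 1) (some i)
    else if PySem.Str.isIn end_marker line && startIdx.isSome then
      match startIdx with
      | some s => some (s, i)   -- break: both indices set
      | none => none            -- unreachable: guarded by startIdx.isSome
    else
      pvLoopA start_marker end_marker rest (i + 1) startIdx

def find_toc_markers (content : String) (start_marker : String) (end_marker : String) : Option (Int × Int) :=
  let lines := (PySem.Str.split? content "\n").getD []   -- sep "\n" ≠ "", so split? is always some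
  pvLoopA start_marker end_marker lines 0 none

-- ===== PORT B =====
-- Source B's helper _first_index: enumerate(lines[start:]) carrying the enumerate counter k,
-- returning start + k at the first line containing marker.
def pvScanTail (marker : String) : List String → Int → Option Int
  | [], _ => none
  | line :: rest, k =>
    if PySem.Str.isIn marker line then some k else pvScanTail marker rest (k + 1)

def pvFirstIndex (lines : List String) (marker : String) (start : Int) : Option Int :=
  (pvScanTail marker (PySem.List.slice lines (some start) none) 0).map (fun k => start + k)

def find_toc_markers_alt (content : String) (start_marker : String) (end_marker : String) : Option (Int × Int) :=
  let lines := (PySem.Str.split? content "\n").getD []   -- sep "\n" ≠ "", so split? is always some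
  match pvFirstIndex lines start_marker 0 with
  | none => none
  | some s =>
    match pvFirstIndex lines end_marker (s + 1) with
    | none => none
    | some e => some (s, e)

-- ===== PRECONDITION & SPEC =====
def Spec_find_toc_markers (content : String) (start_marker : String) (end_marker : String) (out : Option (Int × Int)) : Prop := out = find_toc_markers_alt content start_marker end_marker
instance (content : String) (start_marker : String) (end_marker : String) (out : Option (Int × Int)) : Decidable (Spec_find_toc_markers content start_marker end_marker out) := by unfold Spec_find_toc_markers; infer_instance

-- ===== CLAIM (what is proved, stated in full; the proofs are below) =====
def Claim_equal_find_toc_markers : Prop := ∀ (content : String) (start_marker : String) (end_marker : String), Dom_find_toc_markers content start_marker end_marker → Spec_find_toc_markers content start_marker end_marker (find_toc_markers content start_marker end_marker)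

-- ===== LEMMAS AND PROOFS =====

lemma pvScanTail_eq (m : String) : ∀ (l : List String) (c : Int),
    pvScanTail m l c
      = (List.findIdx? (fun line => PySem.Str.isIn m line) l).map (fun k => c + (k : Int))
  | [], c => rfl
  | line :: rest, c => by
    rw [pvScanTail, List.findIdx?_cons]
    by_cases h : PySem.Str.isIn m line = true
    · rw [if_pos h, if_pos h]; simp
    · rw [if_neg h, if_neg h, pvScanTail_eq m rest (c + 1)]
      cases List.findIdx? (fun line => PySem.Str.isIn m line) rest with
      | none => rfl
      | some v => simp; omega

lemma pvLoopA_some (sm em : String) : ∀ (l : List String) (i s : Int),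
    pvLoopA sm em l i (some s)
      = (List.findIdx? (fun line => PySem.Str.isIn em line) l).map (fun k => (s, i + (k : Int)))
  | [], i, s => rfl
  | line :: rest, i, s => by
    rw [pvLoopA, List.findIdx?_cons]
    simp only [Option.isNone_some, Bool.and_false, Option.isSome_some, Bool.and_true,
      Bool.false_eq_true, if_false]
    by_cases h : PySem.Str.isIn em line = true
    · rw [if_pos h, if_pos h]; simp
    · rw [if_neg h, if_neg h, pvLoopA_some sm em rest (i + 1) s]
      cases List.findIdx? (fun line => PySem.Str.isIn em line) rest with
      | none => rfl
      | some v => simp; omega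

lemma pvLoopA_none (sm em : String) : ∀ (l : List String) (i : Int),
    pvLoopA sm em l i none
      = match List.findIdx? (fun line => PySem.Str.isIn sm line) l with
        | none => none
        | some k => (List.findIdx? (fun line => PySem.Str.isIn em line) (l.drop (k + 1))).map
            (fun j => ((i + (k : Int)), i + (k : Int) + 1 + (j : Int)))
  | [], i => rfl
  | line :: rest, i => by
    rw [pvLoopA, List.findIdx?_cons]
    simp only [Option.isNone_none, Bool.and_true, Option.isSome_none, Bool.and_false,
      Bool.false_eq_true, if_false]
    by_cases h : PySem.Str.isIn sm line = true
    · rw [if_pos h, if_pos h, pvLoopA_some sm em rest (i + 1) i]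
      simp only [List.drop_succ_cons, List.drop_zero, Nat.cast_zero]
      cases List.findIdx? (fun line => PySem.Str.isIn em line) rest with
      | none => rfl
      | some v => simp
    · rw [if_neg h, if_neg h, pvLoopA_none sm em rest (i + 1)]
      cases hf : List.findIdx? (fun line => PySem.Str.isIn sm line) rest with
      | none => rfl
      | some k =>
        simp only [Option.map_some, List.drop_succ_cons]
        cases List.findIdx? (fun line => PySem.Str.isIn em line) (rest.drop (k + 1)) with
        | none => rfl
        | some v => simp; omega

lemma pvMainAux (sm em : String) (lines : List String) :
    pvLoopA sm em lines 0 none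
      = match pvFirstIndex lines sm 0 with
        | none => none
        | some s =>
          match pvFirstIndex lines em (s + 1) with
          | none => none
          | some e => some (s, e) := by
  rw [pvLoopA_none sm em lines 0]
  unfold pvFirstIndex
  rw [PySem.List.slice_zero_start, PySem.List.slice_none_none, pvScanTail_eq sm lines 0]
  cases hs : List.findIdx? (fun line => PySem.Str.isIn sm line) lines with
  | none => rfl
  | some k =>
    simp only [Option.map_some, Option.bind_some, Option.pure_def, zero_add,
      Option.bind_eq_bind]
    have h01 : (0 : Int) ≤ (k : Int) + 1 := by positivity
    rw [PySem.List.slice_from lines h01, pvScanTail_eq em _ 0]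
    have hk : ((k : Int) + 1).toNat = k + 1 := by omega
    rw [hk]
    cases List.findIdx? (fun line => PySem.Str.isIn em line) (lines.drop (k + 1)) with
    | none => rfl
    | some v => simp

-- ===== VERDICT (by name: the statement is the Claim_ definition above) =====
theorem find_toc_markers_spec : Claim_equal_find_toc_markers := by
  intro content sm em _
  unfold Spec_find_toc_markers find_toc_markers find_toc_markers_alt
  exact pvMainAux sm em ((PySem.Str.split? content "\n").getD [])
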